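-- pv_equiv track=rewrite | github.com/arnavgupta9000/Leetcode | daily/problem 916.py | solve
-- ===== SOURCE A (Python) =====
-- def solve(words1, words2):
--     res = []
--     hash2 = {}
--     for j in words2:
--         for k in j:
--             hash2[k] = hash2.get(k,0) + 1
--
--     for i in words1:
--         hash1 = {}
--
--         for k in i:
--             if k in hash2:
--                 hash1[k] = hash1.get(k,0) +1
--                 if hash1[k] > hash2[k]:
--                     hash1[k] = hash2[k]
--         if hash1 == hash2:
--             res.append(i)
--
--     return res
-- ===== SOURCE B (Python) =====
-- def solve(words1, words2):
--     need = [c for j in words2 for c in j]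
--     res = []
--     for w in words1:
--         avail = list(w)
--         ok = True
--         for c in need:
--             if c in avail:
--                 avail.remove(c)
--             else:
--                 ok = False
--                 break
--         if ok:
--             res.append(w)
--     return res
-- ===== Notes on version B (the rewrite author's own statement) =====
-- stated objective: alternative
-- what changed: B builds no counters at all: the pooled requirement is kept as a flat list of letters, and each words1 word is tested by destructive multiset matching - walk the needed letters, removing each from a mutable copy of the word and breaking on the first letter that cannot be removed - instead of A's per-word hash-count dictionary compared for equality with the pooled dict.
import Mathlib
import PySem

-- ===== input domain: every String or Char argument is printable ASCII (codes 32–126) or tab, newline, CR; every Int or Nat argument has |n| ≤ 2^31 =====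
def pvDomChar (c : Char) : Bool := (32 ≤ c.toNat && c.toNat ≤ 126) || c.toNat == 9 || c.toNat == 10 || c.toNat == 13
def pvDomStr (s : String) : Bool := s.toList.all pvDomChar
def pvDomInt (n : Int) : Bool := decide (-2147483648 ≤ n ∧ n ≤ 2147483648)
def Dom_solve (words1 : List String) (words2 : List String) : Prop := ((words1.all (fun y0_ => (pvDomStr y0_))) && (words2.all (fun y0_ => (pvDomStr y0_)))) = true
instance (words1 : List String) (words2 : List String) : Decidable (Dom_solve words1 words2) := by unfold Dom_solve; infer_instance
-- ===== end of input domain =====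

-- B keeps the pooled requirement as a flat list of letters and tests each word by
-- destructive multiset matching (remove each needed letter from a copy of the word,
-- fail on the first that is missing) instead of A's two count-dicts compared for
-- equality (objective: alternative).

-- ===== PORT A =====
-- Python dict '==' ignores insertion order: compare the two dicts as mappings (each
-- item of one is looked up in the other); exact for dicts with unique keys.
def pyDictEq (d1 d2 : PySem.Dict Char Int) : Bool :=
  d1.items.all (fun p => d2.get? p.1 == some p.2) &&
  d2.items.all (fun p => d1.get? p.1 == some p.2)

-- body of A's inner 'for k in i' loop
def solveStep (hash2 : PySem.Dict Char Int) (h1 : PySem.Dict Char Int) (k : Char) : PySem.Dict Char Int :=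
  if hash2.contains k then
    if (h1.insert k (h1.getD k 0 + 1)).getD k 0 > hash2.getD k 0 then
      (h1.insert k (h1.getD k 0 + 1)).insert k (hash2.getD k 0)
    else h1.insert k (h1.getD k 0 + 1)
  else h1

def solve (words1 : List String) (words2 : List String) : List String :=
  let hash2 := words2.foldl (fun d j => j.toList.foldl (fun d k => d.insert k (d.getD k 0 + 1)) d) PySem.Dict.empty
  words1.foldl (fun res i =>
    let hash1 := i.toList.foldl (solveStep hash2) PySem.Dict.empty
    if pyDictEq hash1 hash2 then res ++ [i] else res) []

-- ===== PORT B =====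
-- B's inner loop: for c in need: if c in avail: avail.remove(c) else: break with ok=False
-- ('avail.remove(c)' after a successful 'c in avail' test = erase the first occurrence)
def covers : List Char → List Char → Bool
  | [], _ => true
  | c :: cs, avail => if c ∈ avail then covers cs (avail.erase c) else false

def solve_alt (words1 : List String) (words2 : List String) : List String :=
  let need := words2.flatMap String.toList     -- [c for j in words2 for c in j]
  words1.foldl (fun res w => if covers need w.toList then res ++ [w] else res) []

-- ===== PRECONDITION & SPEC =====
def Spec_solve (words1 : List String) (words2 : List String) (out : List String) : Prop := out = solve_alt words1 words2
instance (words1 : List String) (words2 : List String) (out : List String) : Decidable (Spec_solve words1 words2 out) := by unfold Spec_solve; infer_instance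

-- ===== CLAIM (what is proved, stated in full; the proofs are below) =====
def Claim_equal_solve : Prop := ∀ (words1 : List String) (words2 : List String), Dom_solve words1 words2 → Spec_solve words1 words2 (solve words1 words2)

-- ===== LEMMAS AND PROOFS =====

-- the pooled counter: value at k is the count of k in the concatenated words2
theorem pool_getD (ws : List String) (d : PySem.Dict Char Int) (k : Char) :
    (ws.foldl (fun d j => j.toList.foldl (fun d k => d.insert k (d.getD k 0 + 1)) d) d).getD k 0
      = d.getD k 0 + ((ws.flatMap String.toList).count k : Int) := by
  induction ws generalizing d with
  | nil => simp
  | cons j tl ih =>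
      simp only [List.foldl_cons, List.flatMap_cons, List.count_append, ih,
        PySem.Dict.getD_foldl_insert_add_one]
      push_cast; ring

theorem pool_nodup (ws : List String) (d : PySem.Dict Char Int) (h : d.keys.Nodup) :
    (ws.foldl (fun d j => j.toList.foldl (fun d k => d.insert k (d.getD k 0 + 1)) d) d).keys.Nodup := by
  induction ws generalizing d with
  | nil => exact h
  | cons j tl ih => exact ih _ (PySem.Dict.nodup_keys_foldl_insert _ _ _ h)

theorem pool_contains (ws : List String) (d : PySem.Dict Char Int) (k : Char) :
    ((ws.foldl (fun d j => j.toList.foldl (fun d k => d.insert k (d.getD k 0 + 1)) d) d).contains k = true)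
      ↔ (d.contains k = true ∨ k ∈ ws.flatMap String.toList) := by
  induction ws generalizing d with
  | nil => simp
  | cons j tl ih =>
      simp only [List.foldl_cons, List.flatMap_cons, List.mem_append, ih]
      constructor
      · rintro (h | h)
        · rw [PySem.Dict.contains_iff_mem_keys, PySem.Dict.keys_foldl_insert,
            PySem.Set.mem_update] at h
          rcases h with h | h
          · exact Or.inl (PySem.Dict.contains_iff_mem_keys _ _ |>.mpr h)
          · exact Or.inr (Or.inl h)
        · exact Or.inr (Or.inr h)
      · rintro (h | h | h)
        · refine Or.inl ?_
          rw [PySem.Dict.contains_iff_mem_keys, PySem.Dict.keys_foldl_insert, PySem.Set.mem_update]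
          exact Or.inl (PySem.Dict.contains_iff_mem_keys _ _ |>.mp h)
        · refine Or.inl ?_
          rw [PySem.Dict.contains_iff_mem_keys, PySem.Dict.keys_foldl_insert, PySem.Set.mem_update]
          exact Or.inr h
        · exact Or.inr h

-- one step of A's inner loop, as three facts
theorem solveStep_of_not (h2 h1 : PySem.Dict Char Int) (c : Char) (hc : ¬ h2.contains c = true) :
    solveStep h2 h1 c = h1 := by
  unfold solveStep; rw [if_neg hc]

theorem solveStep_contains (h2 h1 : PySem.Dict Char Int) (c k : Char) :
    (solveStep h2 h1 c).contains k = ((h2.contains c && (k == c)) || h1.contains k) := by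
  unfold solveStep
  by_cases hc : h2.contains c = true
  · rw [if_pos hc]
    split
    · simp [PySem.Dict.contains_insert, hc]
    · simp [PySem.Dict.contains_insert, hc]
  · rw [if_neg hc]
    simp [Bool.eq_false_iff.mpr hc]

theorem solveStep_getD_self (h2 h1 : PySem.Dict Char Int) (c : Char) (hc : h2.contains c = true) :
    (solveStep h2 h1 c).getD c 0 = min (h1.getD c 0 + 1) (h2.getD c 0) := by
  unfold solveStep
  rw [if_pos hc]
  split
  · next h => simp only [PySem.Dict.getD_insert_self] at h ⊢; omega
  · next h => simp only [PySem.Dict.getD_insert_self] at h ⊢; omega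

theorem solveStep_getD_of_ne (h2 h1 : PySem.Dict Char Int) (c k : Char) (hck : c ≠ k) :
    (solveStep h2 h1 c).getD k 0 = h1.getD k 0 := by
  unfold solveStep
  split
  · split
    · simp [PySem.Dict.getD_insert, Ne.symm hck]
    · simp [PySem.Dict.getD_insert, Ne.symm hck]
  · rfl

-- inner-loop membership: hash1 holds exactly the chars of the word that hash2 holds
theorem inner_contains (h2 : PySem.Dict Char Int) (cs : List Char) (h1 : PySem.Dict Char Int) (k : Char) :
    ((cs.foldl (solveStep h2) h1).contains k = true)
      ↔ (h1.contains k = true ∨ (h2.contains k = true ∧ k ∈ cs)) := by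
  induction cs generalizing h1 with
  | nil => simp
  | cons c tl ih =>
      rw [List.foldl_cons, ih, solveStep_contains]
      by_cases hck : k = c
      · subst hck
        simp only [beq_self_eq_true, Bool.and_true, Bool.or_eq_true, List.mem_cons]
        tauto
      · have hbe : (k == c) = false := by simp [hck]
        simp only [hbe, Bool.and_false, Bool.false_or, List.mem_cons]
        constructor
        · rintro (h | h)
          · exact Or.inl h
          · exact Or.inr ⟨h.1, Or.inr h.2⟩
        · rintro (h | ⟨hk, (h | h)⟩)
          · exact Or.inl h
          · exact absurd h hck
          · exact Or.inr ⟨hk, h⟩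

-- inner-loop values: capped running count = min(count so far, pooled count)
theorem inner_getD (h2 : PySem.Dict Char Int) (cs : List Char) (h1 : PySem.Dict Char Int) (k : Char)
    (hinv : h2.contains k = true → h1.getD k 0 ≤ h2.getD k 0) :
    (cs.foldl (solveStep h2) h1).getD k 0
      = if h2.contains k = true then min (h1.getD k 0 + (cs.count k : Int)) (h2.getD k 0)
        else h1.getD k 0 := by
  induction cs generalizing h1 with
  | nil =>
      by_cases hc : h2.contains k = true
      · have := hinv hc; rw [if_pos hc]; simp; omega
      · rw [List.foldl_nil, if_neg hc]
  | cons c tl ih =>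
      rw [List.foldl_cons, List.count_cons]
      by_cases hck : c = k
      · subst hck
        by_cases hc : h2.contains c = true
        · have hstep := solveStep_getD_self h2 h1 c hc
          rw [ih _ (fun _ => by rw [hstep]; omega), if_pos hc, if_pos hc, hstep]
          have := hinv hc
          simp only [beq_self_eq_true, if_true]
          push_cast; omega
        · rw [solveStep_of_not h2 h1 c hc, ih _ hinv, if_neg hc, if_neg hc]
      · have hstep := solveStep_getD_of_ne h2 h1 c k hck
        have hne : ¬ (c == k) = true := by simp [hck]
        rw [ih _ (fun h => by rw [hstep]; exact hinv h), hstep]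
        rw [if_neg hne]
        by_cases hc : h2.contains k = true
        · rw [if_pos hc, if_pos hc]; push_cast; ring_nf
        · rw [if_neg hc, if_neg hc]

theorem inner_nodup (h2 : PySem.Dict Char Int) (cs : List Char) (h1 : PySem.Dict Char Int)
    (h : h1.keys.Nodup) : (cs.foldl (solveStep h2) h1).keys.Nodup := by
  induction cs generalizing h1 with
  | nil => exact h
  | cons c tl ih =>
      refine ih _ ?_
      unfold solveStep
      split
      · split
        · exact PySem.Dict.nodup_keys_insert _ _ _ (PySem.Dict.nodup_keys_insert _ _ _ h)
        · exact PySem.Dict.nodup_keys_insert _ _ _ h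
      · exact h

-- a contained key is looked up as its stored value
theorem dict_get?_eq_some_getD (d : PySem.Dict Char Int) (k : Char) (h : d.contains k = true) :
    d.get? k = some (d.getD k 0) := by
  rw [PySem.Dict.contains_eq_isSome_get?] at h
  rcases Option.isSome_iff_exists.mp h with ⟨v, hv⟩
  rw [hv, PySem.Dict.getD_of_get?_eq_some d 0 hv]

-- A's capped-dict equality test, characterised by counts: the capped dict equals the
-- pooled counter (as a Python mapping) iff every pooled letter occurs at least its
-- required number of times in the word
theorem a_test_iff (H2 : PySem.Dict Char Int) (pool cs : List Char)
    (hn2 : H2.keys.Nodup)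
    (hget2 : ∀ k, H2.getD k 0 = (pool.count k : Int))
    (hcont2 : ∀ k, H2.contains k = true ↔ k ∈ pool) :
    pyDictEq (cs.foldl (solveStep H2) PySem.Dict.empty) H2 = true
      ↔ ∀ k, pool.count k ≤ cs.count k := by
  have hn1 : (cs.foldl (solveStep H2) PySem.Dict.empty).keys.Nodup :=
    inner_nodup H2 cs _ (by simp)
  have hc1 : ∀ k, (cs.foldl (solveStep H2) PySem.Dict.empty).contains k = true
      ↔ (H2.contains k = true ∧ k ∈ cs) := fun k => by
    rw [inner_contains]; simp
  have hg1 : ∀ k, H2.contains k = true →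
      (cs.foldl (solveStep H2) PySem.Dict.empty).getD k 0 = min ((cs.count k : Int)) (H2.getD k 0) := by
    intro k hk
    rw [inner_getD H2 cs _ k (fun _ => by simp [hget2]), if_pos hk]
    simp
  unfold pyDictEq
  simp only [Bool.and_eq_true, List.all_eq_true, beq_iff_eq]
  constructor
  · rintro ⟨-, R⟩ k
    by_cases hk : k ∈ pool
    · have hk2 := (hcont2 k).mpr hk
      have hH2get := dict_get?_eq_some_getD H2 k hk2
      have h1g := R ⟨k, H2.getD k 0⟩ (PySem.Dict.mem_items_of_get?_eq_some _ hH2get)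
      have hcont : (cs.foldl (solveStep H2) PySem.Dict.empty).contains k = true := by
        rw [PySem.Dict.contains_eq_isSome_get?, h1g]; rfl
      have hval := PySem.Dict.getD_of_get?_eq_some _ 0 h1g
      have hmin := hg1 k hk2
      have hcnt := hget2 k
      simp only at hval hmin
      omega
    · have : pool.count k = 0 := List.count_eq_zero.mpr hk
      omega
  · intro R
    constructor
    · rintro ⟨k, v⟩ hp
      have h1 := PySem.Dict.get?_of_mem_items _ hp hn1
      have hcont : (cs.foldl (solveStep H2) PySem.Dict.empty).contains k = true := by
        rw [PySem.Dict.contains_eq_isSome_get?, h1]; rfl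
      obtain ⟨hk2, -⟩ := (hc1 k).mp hcont
      have hval := PySem.Dict.getD_of_get?_eq_some _ 0 h1
      have hmin := hg1 k hk2
      have hH2get := dict_get?_eq_some_getD H2 k hk2
      have hcnt := hget2 k
      have hR := R k
      simp only at hval hmin ⊢
      rw [hH2get]
      exact congrArg some (by omega)
    · rintro ⟨k, v⟩ hp
      have hv2 := PySem.Dict.get?_of_mem_items _ hp hn2
      have hk2 : H2.contains k = true := by
        rw [PySem.Dict.contains_eq_isSome_get?, hv2]; rfl
      have hvd := PySem.Dict.getD_of_get?_eq_some _ 0 hv2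
      have hcnt := hget2 k
      have hR := R k
      have hvp : (1 : Int) ≤ v := by
        have hm := (hcont2 k).mp hk2
        have hcp : 0 < pool.count k := List.count_pos_iff.mpr hm
        simp only at hvd
        omega
      have hkcs : k ∈ cs := List.count_pos_iff.mp (by omega)
      have hcont1 := (hc1 k).mpr ⟨hk2, hkcs⟩
      have hmin := hg1 k hk2
      rw [dict_get?_eq_some_getD _ k hcont1]
      simp only at hvd
      exact congrArg some (by omega)

-- B's destructive matching, characterised by the same counts condition
theorem covers_iff (need avail : List Char) :
    covers need avail = true ↔ ∀ k, need.count k ≤ avail.count k := by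
  induction need generalizing avail with
  | nil => simp [covers]
  | cons c cs ih =>
      unfold covers
      by_cases hc : c ∈ avail
      · rw [if_pos hc, ih]
        have key : ∀ k, ((c :: cs).count k ≤ avail.count k ↔ cs.count k ≤ (avail.erase c).count k) := by
          intro k
          have hcpos : 0 < avail.count c := List.count_pos_iff.mpr hc
          have h2 := List.count_erase (a := k) (b := c) (l := avail)
          rw [List.count_cons]
          by_cases hkc : k = c
          · subst hkc; simp only [beq_self_eq_true, if_true] at h2 ⊢; omega
          · have hb : (c == k) = false := by simp [Ne.symm hkc]
            simp [hb] at h2 ⊢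
            omega
        exact ⟨fun R k => (key k).mpr (R k), fun R k => (key k).mp (R k)⟩
      · rw [if_neg hc]
        refine iff_of_false (by simp) ?_
        intro R
        have hR := R c
        have h0 : avail.count c = 0 := List.count_eq_zero.mpr hc
        rw [List.count_cons, h0] at hR
        simp at hR

-- the per-word test of A equals the per-word test of B
theorem test_eq (words2 : List String) (w : String) :
    (pyDictEq ((String.toList w).foldl (solveStep (words2.foldl (fun d j => j.toList.foldl (fun d k => d.insert k (d.getD k 0 + 1)) d) PySem.Dict.empty)) PySem.Dict.empty)
        (words2.foldl (fun d j => j.toList.foldl (fun d k => d.insert k (d.getD k 0 + 1)) d) PySem.Dict.empty))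
      = covers (words2.flatMap String.toList) w.toList := by
  rw [Bool.eq_iff_iff, covers_iff]
  refine a_test_iff _ (words2.flatMap String.toList) w.toList
    (pool_nodup words2 _ (by simp)) (fun k => ?_) (fun k => ?_)
  · have := pool_getD words2 PySem.Dict.empty k
    simpa using this
  · have := pool_contains words2 PySem.Dict.empty k
    simpa using this

-- ===== VERDICT (by name: the statement is the Claim_ definition above) =====
theorem solve_spec : Claim_equal_solve := by
  intro words1 words2 _
  unfold Spec_solve solve solve_alt
  rw [PySem.List.foldl_append_if_eq_filter, PySem.List.foldl_append_if_eq_filter]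
  simp only [List.nil_append]
  exact List.filter_congr (fun w _ => test_eq words2 w)
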